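-- pv_equiv track=rewrite | github.com/tathagatnawadia/Python_Experiments | testing/codejams/revereshufflemerge.py | splitWordsLexicographically
-- ===== SOURCE A (Python) =====
-- def reverse(S):
-- 	return S[::-1]
--
-- def splitWordsLexicographically(word, letter):
-- 	reverse_word = reverse(word)
-- 	j = 0
-- 	match = False
-- 	for i in reverse_word:
-- 		if i == letter:
-- 			match = True
-- 			break
-- 		j = j + 1
-- 	if match == True:
-- 		return reverse(reverse_word[j:])
-- 	else:
-- 		return None
-- ===== SOURCE B (Python) =====
-- def splitWordsLexicographically(word, letter):
--     last_index = -1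
--     for i, ch in enumerate(word):
--         if ch == letter:
--             last_index = i
--     if last_index >= 0:
--         return word[:last_index + 1]
--     return None
-- ===== Notes on version B (the rewrite author's own statement) =====
-- stated objective: simpler
-- what changed: Replaced A's double-reverse with early-break scan by a single forward pass that tracks the index of the last matching character and returns the prefix up to it.
import Mathlib
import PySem

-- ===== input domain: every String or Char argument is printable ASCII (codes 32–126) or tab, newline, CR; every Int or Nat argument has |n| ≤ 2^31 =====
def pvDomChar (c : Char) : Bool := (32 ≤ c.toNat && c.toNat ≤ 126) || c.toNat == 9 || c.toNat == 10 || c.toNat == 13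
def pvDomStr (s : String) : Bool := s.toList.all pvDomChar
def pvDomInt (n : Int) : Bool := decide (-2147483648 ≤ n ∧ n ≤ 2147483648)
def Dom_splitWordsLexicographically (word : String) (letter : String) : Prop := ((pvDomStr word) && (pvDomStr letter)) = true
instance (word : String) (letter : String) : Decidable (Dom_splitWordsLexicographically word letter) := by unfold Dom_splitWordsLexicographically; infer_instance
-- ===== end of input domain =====

-- B replaces A's reversed scan with early break (and two reversals) by one forward pass tracking the last match: simpler.

-- ===== PORT A =====
-- A's loop over the reversed word: counts j until the first char equal to letter (as a 1-char string), returns (j, match).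
def pvFindA : List Char → List Char → Nat × Bool
  | [], _ => (0, false)
  | c :: rest, lt =>
    if [c] = lt then (0, true)
    else
      let (j, m) := pvFindA rest lt
      (j + 1, m)

def splitWordsLexicographically (word : String) (letter : String) : Option String :=
  let reverseWord := word.toList.reverse
  let (j, m) := pvFindA reverseWord letter.toList
  if m then some (String.ofList ((reverseWord.drop j).reverse)) else none

-- ===== PORT B =====
-- Source B's forward enumerate loop: carries index i and last_index.
def pvLastB : List Char → List Char → Int → Int → Int
  | [], _, _, lastIndex => lastIndex
  | c :: rest, lt, i, lastIndex =>
    pvLastB rest lt (i + 1) (if [c] = lt then i else lastIndex)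

def splitWordsLexicographically_alt (word : String) (letter : String) : Option String :=
  let lastIndex := pvLastB word.toList letter.toList 0 (-1)
  if 0 ≤ lastIndex then some (String.ofList (word.toList.take (lastIndex + 1).toNat)) else none

-- ===== PRECONDITION & SPEC =====
def Spec_splitWordsLexicographically (word : String) (letter : String) (out : Option String) : Prop := out = splitWordsLexicographically_alt word letter
instance (word : String) (letter : String) (out : Option String) : Decidable (Spec_splitWordsLexicographically word letter out) := by unfold Spec_splitWordsLexicographically; infer_instance

-- ===== CLAIM (what is proved, stated in full; the proofs are below) =====
def Claim_equal_splitWordsLexicographically : Prop := ∀ (word : String) (letter : String), Dom_splitWordsLexicographically word letter → Spec_splitWordsLexicographically word letter (splitWordsLexicographically word letter)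

-- ===== LEMMAS AND PROOFS =====

theorem pvLastB_append (l : List Char) (x : Char) (lt : List Char) :
    ∀ (i lastIndex : Int), pvLastB (l ++ [x]) lt i lastIndex =
      if [x] = lt then i + (l.length : Int) else pvLastB l lt i lastIndex := by
  induction l with
  | nil =>
    intro i lastIndex
    simp only [List.nil_append, pvLastB, List.length_nil]
    split_ifs <;> simp
  | cons c rest ih =>
    intro i lastIndex
    simp only [List.cons_append, pvLastB, ih, List.length_cons]
    split_ifs <;> push_cast <;> ring_nf

theorem pvMain (lt : List Char) (l : List Char) :
    ((pvFindA l.reverse lt).2 = true →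
      pvLastB l lt 0 (-1) = (l.length : Int) - 1 - ((pvFindA l.reverse lt).1 : Int) ∧
      (pvFindA l.reverse lt).1 < l.length) ∧
    ((pvFindA l.reverse lt).2 = false → pvLastB l lt 0 (-1) = -1) := by
  induction l using List.reverseRecOn with
  | nil => simp [pvFindA, pvLastB]
  | append_singleton l x ih =>
    rw [List.reverse_append]
    simp only [List.reverse_cons, List.reverse_nil, List.nil_append, List.singleton_append,
      pvFindA, pvLastB_append]
    by_cases hx : [x] = lt
    · subst hx
      simp only [if_true, List.length_append, List.length_cons,
        List.length_nil]
      refine ⟨fun _ => ⟨by push_cast; ring, by omega⟩, by simp⟩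
    · simp only [if_neg hx]
      obtain ⟨h1, h2⟩ := ih
      cases hm : (pvFindA l.reverse lt).2 with
      | true =>
        obtain ⟨e1, e2⟩ := h1 hm
        simp only [e1, List.length_append, List.length_singleton]
        refine ⟨fun _ => ⟨by push_cast; omega, by omega⟩, by simp⟩
      | false =>
        have e := h2 hm
        simp [e]

theorem splitWordsLexicographically_eq (word letter : String) :
    splitWordsLexicographically word letter = splitWordsLexicographically_alt word letter := by
  unfold splitWordsLexicographically splitWordsLexicographically_alt
  set l := word.toList with hl
  set lt := letter.toList with hlt
  obtain ⟨h1, h2⟩ := pvMain lt l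
  cases hm : (pvFindA l.reverse lt).2 with
  | false =>
    have e := h2 hm
    simp [hm, e]
  | true =>
    obtain ⟨e1, e2⟩ := h1 hm
    set j := (pvFindA l.reverse lt).1 with hj
    have hge : (0 : Int) ≤ (l.length : Int) - 1 - (j : Int) := by omega
    simp only [hm, e1, if_pos hge, if_true]
    congr 1
    have htn : ((l.length : Int) - 1 - (j : Int) + 1).toNat = l.length - j := by omega
    rw [htn]
    congr 1
    rw [List.drop_reverse, List.reverse_reverse]

-- ===== VERDICT (by name: the statement is the Claim_ definition above) =====
theorem splitWordsLexicographically_spec : Claim_equal_splitWordsLexicographically := by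
  intro word letter _
  unfold Spec_splitWordsLexicographically
  exact splitWordsLexicographically_eq word letter
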